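-- pv_equiv track=rewrite | github.com/georgedashen/DualNetGO | preprocessing/annotation_preprocess.py | prune_inconsistTerms
-- ===== SOURCE A (Python) =====
-- def prune_inconsistTerms(annos):
--     con_train_anno_dic = annos['train']
--     con_valid_anno_dic = annos['valid']
--     con_test_anno_dic = annos['test']
--
--     for go_id in list(con_train_anno_dic):
--         if go_id not in con_test_anno_dic:
--             con_train_anno_dic.pop(go_id)
--
--     for go_id in list(con_train_anno_dic):
--         if go_id not in con_valid_anno_dic:
--             con_train_anno_dic.pop(go_id)
--
--     for go_id in list(con_valid_anno_dic):
--         if go_id not in con_train_anno_dic: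
--             con_valid_anno_dic.pop(go_id)
--
--     for go_id in list(con_valid_anno_dic):
--         if go_id not in con_test_anno_dic:
--             con_valid_anno_dic.pop(go_id)
--
--     for go_id in list(con_test_anno_dic):
--         if go_id not in con_train_anno_dic:
--             con_test_anno_dic.pop(go_id)
--
--     for go_id in list(con_test_anno_dic):
--         if go_id not in con_valid_anno_dic:
--             con_test_anno_dic.pop(go_id)
--
--     con_anno_dic = {}
--     con_anno_dic['train'] = con_train_anno_dic
--     con_anno_dic['valid'] = con_valid_anno_dic
--     con_anno_dic['test'] = con_test_anno_dic
--     return con_anno_dic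
-- ===== SOURCE B (Python) =====
-- def prune_inconsistTerms(annos):
--     train = annos['train']
--     valid = annos['valid']
--     test = annos['test']
--     common = set(train) & set(valid) & set(test)
--     for d in (train, valid, test):
--         for go_id in list(d):
--             if go_id not in common:
--                 d.pop(go_id)
--     return {'train': train, 'valid': valid, 'test': test}
-- ===== Notes on version B (the rewrite author's own statement) =====
-- stated objective: simpler
-- what changed: Computes the common key set once as a three-way set intersection of the original key sets, then prunes each of the three splits in one uniform pass against it, replacing A's six pairwise cross-pruning loops.
import Mathlib
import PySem

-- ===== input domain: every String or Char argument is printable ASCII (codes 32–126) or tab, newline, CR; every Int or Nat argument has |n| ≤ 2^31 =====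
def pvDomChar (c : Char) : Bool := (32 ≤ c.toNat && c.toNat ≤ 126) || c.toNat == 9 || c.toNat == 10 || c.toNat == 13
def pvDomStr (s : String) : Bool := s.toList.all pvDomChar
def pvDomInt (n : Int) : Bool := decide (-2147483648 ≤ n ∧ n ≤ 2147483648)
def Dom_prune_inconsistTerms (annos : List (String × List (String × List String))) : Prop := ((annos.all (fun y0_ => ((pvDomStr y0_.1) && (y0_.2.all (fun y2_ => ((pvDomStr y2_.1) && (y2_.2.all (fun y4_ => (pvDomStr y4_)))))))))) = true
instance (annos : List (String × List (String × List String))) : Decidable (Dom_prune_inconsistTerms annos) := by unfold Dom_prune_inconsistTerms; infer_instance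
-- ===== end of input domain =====

-- ===== PORT A =====
-- Port of A. Note: the Python A mutates the three inner dicts of its argument in place;
-- the equivalence proved here is about the RETURN value (B performs the same in-place mutation).
def prune_inconsistTerms (annos : List (String × List (String × List String))) : List (String × List (String × List String)) :=
  let d := PySem.Dict.ofList annos
  match d.get? "train", d.get? "valid", d.get? "test" with
  | some tr, some va, some te =>
    let dtr := PySem.Dict.ofList tr
    let dva := PySem.Dict.ofList va
    let dte := PySem.Dict.ofList te
    -- for go_id in list(train): if go_id not in test: train.pop(go_id)
    let dtr := dtr.keys.foldl (fun acc k => if dte.contains k then acc else acc.erase k) dtr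
    -- for go_id in list(train): if go_id not in valid: train.pop(go_id)
    let dtr := dtr.keys.foldl (fun acc k => if dva.contains k then acc else acc.erase k) dtr
    -- for go_id in list(valid): if go_id not in train: valid.pop(go_id)
    let dva := dva.keys.foldl (fun acc k => if dtr.contains k then acc else acc.erase k) dva
    -- for go_id in list(valid): if go_id not in test: valid.pop(go_id)
    let dva := dva.keys.foldl (fun acc k => if dte.contains k then acc else acc.erase k) dva
    -- for go_id in list(test): if go_id not in train: test.pop(go_id)
    let dte := dte.keys.foldl (fun acc k => if dtr.contains k then acc else acc.erase k) dte
    -- for go_id in list(test): if go_id not in valid: test.pop(go_id)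
    let dte := dte.keys.foldl (fun acc k => if dva.contains k then acc else acc.erase k) dte
    -- con_anno_dic = {}; con_anno_dic['train'] = …; …; return con_anno_dic
    ((((PySem.Dict.empty).insert "train" dtr.items).insert "valid" dva.items).insert "test" dte.items).items
  | _, _, _ => []  -- KeyError: excluded by Pre_

-- ===== PORT B =====
-- for go_id in list(d): if go_id not in common: d.pop(go_id)
def pvPruneToCommon (common : PySem.Set String) (d : PySem.Dict String (List String)) : PySem.Dict String (List String) :=
  d.keys.foldl (fun acc k => if common.contains k then acc else acc.erase k) d

def prune_inconsistTerms_alt (annos : List (String × List (String × List String))) : List (String × List (String × List String)) :=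
  let d := PySem.Dict.ofList annos
  -- train = annos['train']; valid = annos['valid']; test = annos['test']  (KeyError -> none, excluded by Pre_)
  (((d.get? "train").bind fun tr => (d.get? "valid").bind fun va => (d.get? "test").map fun te =>
    let dtr := PySem.Dict.ofList tr
    let dva := PySem.Dict.ofList va
    let dte := PySem.Dict.ofList te
    -- common = set(train) & set(valid) & set(test)
    let common : PySem.Set String :=
      PySem.Set.inter (PySem.Set.inter (PySem.Set.ofList dtr.keys) dva.keys) dte.keys
    let dtr := pvPruneToCommon common dtr
    let dva := pvPruneToCommon common dva
    let dte := pvPruneToCommon common dte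
    -- return {'train': train, 'valid': valid, 'test': test}
    (PySem.Dict.ofList [("train", dtr.items), ("valid", dva.items), ("test", dte.items)]).items) : Option _).getD []

-- ===== PRECONDITION & SPEC =====
-- Pre_ excludes exactly the inputs on which the Python A raises KeyError: the outer dict
-- must carry the keys 'train', 'valid' and 'test'.
def Pre_prune_inconsistTerms (annos : List (String × List (String × List String))) : Prop :=
  "train" ∈ annos.map Prod.fst ∧ "valid" ∈ annos.map Prod.fst ∧ "test" ∈ annos.map Prod.fst
instance (annos : List (String × List (String × List String))) : Decidable (Pre_prune_inconsistTerms annos) := by unfold Pre_prune_inconsistTerms; infer_instance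

def pvWitness_prune_inconsistTerms : (List (String × List (String × List String))) :=
  [("train", [("GO:1", ["p1"]), ("GO:2", ["p2"])]),
   ("valid", [("GO:2", ["p3"])]),
   ("test",  [("GO:2", ["p4"]), ("GO:3", ["p5"])])]

def Spec_prune_inconsistTerms (annos : List (String × List (String × List String))) (out : List (String × List (String × List String))) : Prop := out = prune_inconsistTerms_alt annos
instance (annos : List (String × List (String × List String))) (out : List (String × List (String × List String))) : Decidable (Spec_prune_inconsistTerms annos out) := by unfold Spec_prune_inconsistTerms; infer_instance

-- ===== CLAIM (what is proved, stated in full; the proofs are below) =====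
def Claim_equal_prune_inconsistTerms : Prop := ∀ (annos : List (String × List (String × List String))), Dom_prune_inconsistTerms annos → Pre_prune_inconsistTerms annos → Spec_prune_inconsistTerms annos (prune_inconsistTerms annos)

-- ===== LEMMAS AND PROOFS =====

-- canonical form of one prune pass: the dict restricted to keys satisfying q
def pvFilt (q : String → Bool) (d : PySem.Dict String (List String)) : PySem.Dict String (List String) :=
  PySem.Dict.mk (d.items.filter (fun kv => q kv.1))

lemma pvContains_filt (q : String → Bool) (d : PySem.Dict String (List String)) (k : String) :
    (pvFilt q d).contains k = (d.contains k && q k) := by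
  show (d.items.filter (fun kv => q kv.1)).any (fun p => p.1 == k)
      = ((d.items.any fun p => p.1 == k) && q k)
  induction d.items with
  | nil => simp
  | cons h t ih =>
    by_cases hk : h.1 = k
    · by_cases hq : q h.1 <;> simp [List.filter_cons, hk] <;> simp_all
    · have : (h.1 == k) = false := by simp [hk]
      by_cases hq : q h.1 <;> simp [hq, this, ih]

lemma pvContains_of_mem (d : PySem.Dict String (List String)) {kv : String × List String}
    (h : kv ∈ d.items) : d.contains kv.1 = true := by
  simp [PySem.Dict.contains_eq_decide_mem_keys]
  exact PySem.Dict.mem_keys_of_mem_items d h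

lemma pvFilt_filt (q q' : String → Bool) (d : PySem.Dict String (List String)) :
    pvFilt q (pvFilt q' d) = pvFilt (fun k => q' k && q k) d := by
  apply PySem.Dict.ext
  simp only [pvFilt, List.filter_filter]
  exact List.filter_congr (fun a _ => by rw [Bool.and_comm])

lemma pvFilt_congr {q q' : String → Bool} (d : PySem.Dict String (List String))
    (h : ∀ kv ∈ d.items, q kv.1 = q' kv.1) : pvFilt q d = pvFilt q' d := by
  apply PySem.Dict.ext
  exact List.filter_congr (fun kv hkv => h kv hkv)

-- one in-place prune pass over a snapshot of the keys IS the filter pvFilt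
lemma pvFoldl_erase_eq_filter_aux (q : String → Bool) :
    ∀ (l : List String) (d : PySem.Dict String (List String)),
      l.foldl (fun acc k => if q k then acc else acc.erase k) d
        = PySem.Dict.mk (d.items.filter (fun kv => q kv.1 || !(l.contains kv.1))) := by
  intro l
  induction l with
  | nil => intro d; apply PySem.Dict.ext; simp
  | cons x l ih =>
    intro d
    by_cases hx : q x
    · simp only [List.foldl_cons, hx, if_pos]
      rw [ih d]
      apply PySem.Dict.ext
      refine List.filter_congr (fun kv _ => ?_)
      by_cases hk : kv.1 = x <;> simp [hk, hx]
    · simp only [List.foldl_cons, hx, if_neg, Bool.false_eq_true, not_false_iff]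
      rw [ih (d.erase x)]
      apply PySem.Dict.ext
      show ((d.items.filter _).filter _) = _
      rw [List.filter_filter]
      refine List.filter_congr (fun kv _ => ?_)
      by_cases hk : kv.1 = x <;> simp [hk, hx]

lemma pvPass_eq_filt {α : Type} (p : α → String → Bool)
    (other : α) (d : PySem.Dict String (List String)) :
    d.keys.foldl (fun acc k => if p other k then acc else acc.erase k) d = pvFilt (p other) d := by
  rw [pvFoldl_erase_eq_filter_aux (p other) d.keys d]
  apply PySem.Dict.ext
  refine List.filter_congr (fun kv hkv => ?_)
  have hmem := PySem.Dict.mem_keys_of_mem_items d hkv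
  simp [hmem]

lemma pvCommon_contains (dtr dva dte : PySem.Dict String (List String)) (k : String) :
    (PySem.Set.inter (PySem.Set.inter (PySem.Set.ofList dtr.keys) dva.keys) dte.keys).contains k
      = (dtr.contains k && dva.contains k && dte.contains k) := by
  simp only [PySem.Set.inter, PySem.Dict.contains_eq_decide_mem_keys]
  by_cases h1 : k ∈ dtr.keys <;> by_cases h2 : k ∈ dva.keys <;> by_cases h3 : k ∈ dte.keys <;>
    simp [List.mem_filter, PySem.Set.mem_ofList, h1, h2, h3]

lemma pvGet_some_of_mem (annos : List (String × List (String × List String))) (k : String)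
    (h : k ∈ annos.map Prod.fst) : ∃ v, (PySem.Dict.ofList annos).get? k = some v := by
  have hk : k ∈ (PySem.Dict.ofList annos).keys := by
    rw [show PySem.Dict.ofList annos = PySem.Dict.empty.update annos from rfl, PySem.Dict.update]
    rw [PySem.Dict.keys_foldl_insert_key annos Prod.fst (fun d x => x.2) PySem.Dict.empty]
    simp only [PySem.Set.mem_update, PySem.Dict.keys_empty, List.not_mem_nil, false_or]
    obtain ⟨⟨k', v⟩, hm, rfl⟩ := List.mem_map.mp h
    exact List.mem_map.mpr ⟨(k', v), hm, rfl⟩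
  rcases ho : (PySem.Dict.ofList annos).get? k with _ | v
  · exact absurd ((PySem.Dict.get?_eq_none_iff_not_mem_keys _ k).mp ho) (by simp [hk])
  · exact ⟨v, rfl⟩

-- ===== VERDICT (by name: the statement is the Claim_ definition above) =====
theorem prune_inconsistTerms_spec : Claim_equal_prune_inconsistTerms := by
  intro annos _ hpre
  obtain ⟨h1, h2, h3⟩ := hpre
  obtain ⟨tr, htr⟩ := pvGet_some_of_mem annos "train" h1
  obtain ⟨va, hva⟩ := pvGet_some_of_mem annos "valid" h2
  obtain ⟨te, hte⟩ := pvGet_some_of_mem annos "test" h3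
  unfold Spec_prune_inconsistTerms prune_inconsistTerms prune_inconsistTerms_alt
  simp only [htr, hva, hte, Option.bind_some, Option.map_some, Option.getD_some, pvPruneToCommon]
  set dtr := PySem.Dict.ofList tr with hdtr
  set dva := PySem.Dict.ofList va with hdva
  set dte := PySem.Dict.ofList te with hdte
  rw [pvPass_eq_filt (fun o => o.contains) dte dtr]
  rw [pvPass_eq_filt (fun o => o.contains) dva, pvFilt_filt]
  set tA := pvFilt (fun k => dte.contains k && dva.contains k) dtr with htA
  rw [pvPass_eq_filt (fun o => o.contains) tA dva]
  rw [pvPass_eq_filt (fun o => o.contains) dte, pvFilt_filt]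
  set vA := pvFilt (fun k => tA.contains k && dte.contains k) dva with hvA
  rw [pvPass_eq_filt (fun o => o.contains) tA dte]
  rw [pvPass_eq_filt (fun o => o.contains) vA, pvFilt_filt]
  set common := PySem.Set.inter (PySem.Set.inter (PySem.Set.ofList dtr.keys) dva.keys) dte.keys with hcommon
  rw [pvPass_eq_filt (fun (o : PySem.Set String) => o.contains) common dtr,
      pvPass_eq_filt (fun (o : PySem.Set String) => o.contains) common dva,
      pvPass_eq_filt (fun (o : PySem.Set String) => o.contains) common dte]
  have hcomk : ∀ k, common.contains k = (dtr.contains k && dva.contains k && dte.contains k) :=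
    pvCommon_contains dtr dva dte
  have htAk : ∀ k, tA.contains k = (dtr.contains k && (dte.contains k && dva.contains k)) := by
    intro k; rw [htA, pvContains_filt]
  have hvAk : ∀ k, vA.contains k = (dva.contains k && (tA.contains k && dte.contains k)) := by
    intro k; rw [hvA, pvContains_filt]
  have etr : tA = pvFilt common.contains dtr := by
    refine pvFilt_congr dtr (fun kv hkv => ?_)
    have := pvContains_of_mem dtr hkv
    rw [hcomk]; rw [this]; simp [Bool.and_comm]
  have eva : vA = pvFilt common.contains dva := by
    refine pvFilt_congr dva (fun kv hkv => ?_)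
    have hm := pvContains_of_mem dva hkv
    rw [hcomk, htAk, hm]
    cases dtr.contains kv.1 <;> cases dte.contains kv.1 <;> simp
  have ete : pvFilt (fun k => tA.contains k && vA.contains k) dte = pvFilt common.contains dte := by
    refine pvFilt_congr dte (fun kv hkv => ?_)
    have hm := pvContains_of_mem dte hkv
    rw [hcomk, hvAk, htAk, hm]
    cases dtr.contains kv.1 <;> cases dva.contains kv.1 <;> simp
  rw [ete, etr, eva]; rfl
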